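-- pv_equiv track=rewrite | github.com/engZafer35/Aviora | Customers/generate_protocol_config.py | protocol_key_to_macro_prefix
-- ===== SOURCE A (Python) =====
-- def protocol_key_to_macro_prefix(protocol_key: str) -> str:
--     """protocolRigelMq -> RIGEL_MQ, protocolOrionTlv -> ORION_TLV"""
--     name = protocol_key[8:] if protocol_key.startswith("protocol") else protocol_key
--     parts: list[str] = []
--     for i, c in enumerate(name):
--         if c.isupper() and i > 0 and name[i - 1].islower():
--             parts.append("_")
--         parts.append(c)
--     return "".join(parts).upper()
-- ===== SOURCE B (Python) =====
-- import re
--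
-- def protocol_key_to_macro_prefix(protocol_key: str) -> str:
--     """protocolRigelMq -> RIGEL_MQ, protocolOrionTlv -> ORION_TLV"""
--     name = protocol_key[8:] if protocol_key.startswith("protocol") else protocol_key
--     return re.sub(r'(?<=[a-z])(?=[A-Z])', '_', name).upper()
-- ===== Notes on version B (the rewrite author's own statement) =====
-- stated objective: idiomatic
-- what changed: Replaces the indexed character loop with accumulator list by a single regex substitution that inserts an underscore at each lowercase-to-uppercase boundary, followed by one .upper() call.
import Mathlib
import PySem

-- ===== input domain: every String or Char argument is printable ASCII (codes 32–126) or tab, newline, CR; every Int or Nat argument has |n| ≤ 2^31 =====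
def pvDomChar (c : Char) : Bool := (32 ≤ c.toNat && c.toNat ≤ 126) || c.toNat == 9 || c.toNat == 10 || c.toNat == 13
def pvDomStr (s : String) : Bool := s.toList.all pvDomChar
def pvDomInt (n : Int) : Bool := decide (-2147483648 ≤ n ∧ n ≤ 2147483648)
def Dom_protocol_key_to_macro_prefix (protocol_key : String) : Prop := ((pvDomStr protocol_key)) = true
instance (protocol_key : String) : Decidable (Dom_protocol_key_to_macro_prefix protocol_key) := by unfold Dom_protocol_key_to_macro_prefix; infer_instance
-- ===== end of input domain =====

-- B replaces the indexed character loop by a single regex-style boundary substitution; objective: idiomatic.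

-- ===== PORT A =====
def protocol_key_to_macro_prefix (protocol_key : String) : String :=
  let name : String :=
    if PySem.Str.startswith protocol_key "protocol" then PySem.Str.slice protocol_key (some 8) none
    else protocol_key
  let parts : List String :=
    (PySem.List.enumerate name.toList 0).foldl
      (fun parts ic =>
        let i := ic.1
        let c := ic.2
        let parts :=
          if PySem.Chars.isupper c && decide (i > 0) &&
              (match PySem.Str.pyGet? name (i - 1) with
               | some p => PySem.Chars.islower p
               | none => false) then
            parts ++ ["_"]
          else parts
        parts ++ [String.ofList [c]]) []
  PySem.Str.upper (PySem.Str.join "" parts)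

-- ===== PORT B =====
-- Hand port of re.sub(r'(?<=[a-z])(?=[A-Z])', '_', name): keep the first character, then for each
-- adjacent pair insert '_' before the second character at a [a-z][A-Z] boundary. Exact: the regex
-- matches exactly the empty position between a char in 'a'..'z' and a char in 'A'..'Z'.
def pvCamelSub (cs : List Char) : List Char :=
  match cs with
  | [] => []
  | c :: rest =>
      c :: (cs.zip rest).flatMap
        (fun pc =>
          if (decide ('a' ≤ pc.1) && decide (pc.1 ≤ 'z')) &&
             (decide ('A' ≤ pc.2) && decide (pc.2 ≤ 'Z')) then ['_', pc.2] else [pc.2])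

def protocol_key_to_macro_prefix_alt (protocol_key : String) : String :=
  let name : String :=
    if PySem.Str.startswith protocol_key "protocol" then PySem.Str.slice protocol_key (some 8) none
    else protocol_key
  PySem.Str.upper (String.ofList (pvCamelSub name.toList))

-- ===== PRECONDITION & SPEC =====
def Spec_protocol_key_to_macro_prefix (protocol_key : String) (out : String) : Prop := out = protocol_key_to_macro_prefix_alt protocol_key
instance (protocol_key : String) (out : String) : Decidable (Spec_protocol_key_to_macro_prefix protocol_key out) := by unfold Spec_protocol_key_to_macro_prefix; infer_instance

-- ===== CLAIM (what is proved, stated in full; the proofs are below) =====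
def Claim_equal_protocol_key_to_macro_prefix : Prop := ∀ (protocol_key : String), Dom_protocol_key_to_macro_prefix protocol_key → Spec_protocol_key_to_macro_prefix protocol_key (protocol_key_to_macro_prefix protocol_key)

-- ===== LEMMAS AND PROOFS =====

-- the loop body of port A, named for the proofs
def pvF (name : String) (parts : List String) (ic : Int × Char) : List String :=
  let i := ic.1
  let c := ic.2
  let parts :=
    if PySem.Chars.isupper c && decide (i > 0) &&
        (match PySem.Str.pyGet? name (i - 1) with
         | some p => PySem.Chars.islower p
         | none => false) then
      parts ++ ["_"]
    else parts
  parts ++ [String.ofList [c]]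

-- B's substitution, rephrased with an explicit "previous char" state
def pvGo (prev? : Option Char) : List Char → List Char
  | [] => []
  | c :: rest =>
      (if (match prev? with | some p => PySem.Chars.islower p | none => false) &&
          PySem.Chars.isupper c then ['_', c] else [c]) ++ pvGo (some c) rest

lemma pvGo_some (p : Char) (cs : List Char) :
    pvGo (some p) cs = ((p :: cs).zip cs).flatMap
      (fun pc =>
        if (decide ('a' ≤ pc.1) && decide (pc.1 ≤ 'z')) &&
           (decide ('A' ≤ pc.2) && decide (pc.2 ≤ 'Z')) then ['_', pc.2] else [pc.2]) := by
  induction cs generalizing p with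
  | nil => simp [pvGo]
  | cons c rest ih =>
      simp [pvGo, ih c, PySem.Chars.islower, PySem.Chars.isupper, Bool.and_comm]

lemma pvCamelSub_eq_go (cs : List Char) : pvCamelSub cs = pvGo none cs := by
  cases cs with
  | nil => rfl
  | cons c rest => simp [pvCamelSub, pvGo, pvGo_some]

lemma pvFold (name : String) :
    ∀ (suf : List Char) (k : Nat) (acc : List String), name.toList.drop k = suf →
      (PySem.List.enumerate suf (k : Int)).foldl (pvF name) acc =
        acc ++ (pvGo (if k = 0 then none else name.toList[k - 1]?) suf).map (fun c => String.ofList [c]) := by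
  intro suf
  induction suf with
  | nil => intro k acc _; simp [PySem.List.enumerate, pvGo]
  | cons c rest ih =>
      intro k acc hdrop
      have hk : k < name.toList.length := by
        by_contra h
        simp [List.drop_eq_nil_of_le (Nat.le_of_not_lt h)] at hdrop
      have hget : name.toList[k]? = some c := by
        have := congrArg (fun l => l.head?) hdrop
        simpa [List.head?_drop] using this
      have hrest : name.toList.drop (k + 1) = rest := by
        have := congrArg (fun l => l.tail) hdrop
        simpa [List.tail_drop] using this
      rw [PySem.List.enumerate_cons, List.foldl_cons]
      have ih' := ih (k + 1) (pvF name acc ((k : Int), c)) hrest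
      have hk1 : (k : Int) + 1 = ((k + 1 : Nat) : Int) := by push_cast; ring
      rw [hk1, ih']
      simp only [Nat.add_sub_cancel, Nat.succ_ne_zero, hget]
      cases k with
      | zero =>
          simp [pvF, pvGo, List.append_assoc]
      | succ j =>
          have hj : j < name.toList.length := by omega
          have hprev : name.toList[j]? = some name.toList[j] := List.getElem?_eq_getElem hj
          have hpg : PySem.Str.pyGet? name ((j + 1 : Nat) - 1 : Int) = some name.toList[j] := by
            have : ((j + 1 : Nat) : Int) - 1 = ((j : Nat) : Int) := by push_cast; ring
            rw [this]
            simp [PySem.Str.pyGet?, PySem.List.pyGet?_natCast, hprev]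
          have hus : String.ofList ['_'] = "_" := by decide
          by_cases hl : PySem.Chars.islower name.toList[j] = true <;>
            by_cases hu : PySem.Chars.isupper c = true <;>
              simp [pvF, pvGo, hpg, hprev, hl, hu, hus, List.append_assoc]

-- ===== VERDICT (by name: the statement is the Claim_ definition above) =====
theorem protocol_key_to_macro_prefix_spec : Claim_equal_protocol_key_to_macro_prefix := by
  intro s _
  unfold Spec_protocol_key_to_macro_prefix protocol_key_to_macro_prefix protocol_key_to_macro_prefix_alt
  set name : String :=
    if PySem.Str.startswith s "protocol" then PySem.Str.slice s (some 8) none else s with hname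
  have h := pvFold name name.toList 0 [] (by simp)
  show PySem.Str.upper (PySem.Str.join "" _) = PySem.Str.upper (String.ofList (pvCamelSub name.toList))
  have hfold : (PySem.List.enumerate name.toList (0 : Int)).foldl (pvF name) [] =
      (pvGo none name.toList).map (fun c => String.ofList [c]) := by simpa using h
  have : PySem.Str.join "" ((PySem.List.enumerate name.toList (0 : Int)).foldl (pvF name) []) =
      String.ofList (pvCamelSub name.toList) := by
    apply String.toList_inj.mp
    rw [PySem.Str.toList_join, hfold, pvCamelSub_eq_go]
    simp only [List.map_map, Function.comp_def, String.toList_ofList]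
    exact PySem.Chars.join_nil_singletons _
  rw [← this]
  rfl
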